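-- pv_equiv track=rewrite | github.com/huzaifawork/Flood-Prediction-System | generate_scenario_cases_analysis.py | calculate_risk_levels
-- ===== SOURCE A (Python) =====
-- def calculate_risk_levels(discharge_data):
--     """Calculate risk levels based on discharge values."""
--     risk_levels = []
--     for discharge in discharge_data:
--         if discharge > 3000:
--             risk_level = 5 if discharge > 5000 else 4
--         elif discharge > 2000:
--             risk_level = 3
--         elif discharge > 1500:
--             risk_level = 2
--         else:
--             risk_level = 1
--         risk_levels.append(risk_level)
--     return risk_levels
-- ===== SOURCE B (Python) =====
-- def calculate_risk_levels(discharge_data):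
--     """Calculate risk levels based on discharge values."""
--     thresholds = (1500, 2000, 3000, 5000)
--     return [1 + sum(d > t for t in thresholds) for d in discharge_data]
-- ===== Notes on version B (the rewrite author's own statement) =====
-- stated objective: simpler
-- what changed: Replaces the if/elif cascade with an arithmetic formulation: the risk level is one plus the count of threshold values the discharge strictly exceeds.
import Mathlib
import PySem

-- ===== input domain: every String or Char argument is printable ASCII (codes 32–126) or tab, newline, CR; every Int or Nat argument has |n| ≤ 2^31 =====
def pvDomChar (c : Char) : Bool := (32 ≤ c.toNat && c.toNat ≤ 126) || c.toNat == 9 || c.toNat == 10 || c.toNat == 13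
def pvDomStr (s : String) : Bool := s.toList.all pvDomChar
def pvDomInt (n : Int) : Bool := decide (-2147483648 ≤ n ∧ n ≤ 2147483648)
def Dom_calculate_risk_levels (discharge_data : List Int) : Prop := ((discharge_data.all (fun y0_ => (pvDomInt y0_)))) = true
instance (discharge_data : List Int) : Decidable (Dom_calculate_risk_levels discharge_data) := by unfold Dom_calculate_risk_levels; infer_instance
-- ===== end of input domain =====

-- B replaces A's if/elif cascade with an arithmetic count of thresholds exceeded (objective: simpler).


-- ===== PORT A =====
-- literal transliteration of A: a fold appending one level per element, same branch order
def calculate_risk_levels (discharge_data : List Int) : List Int :=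
  discharge_data.foldl (fun risk_levels discharge =>
    let risk_level : Int :=
      if discharge > 3000 then (if discharge > 5000 then 5 else 4)
      else if discharge > 2000 then 3
      else if discharge > 1500 then 2
      else 1
    risk_levels ++ [risk_level]) []

-- ===== PORT B =====
-- literal transliteration of B: 1 + count of thresholds strictly below the discharge
def calculate_risk_levels_alt (discharge_data : List Int) : List Int :=
  discharge_data.map (fun d =>
    1 + ((([1500, 2000, 3000, 5000] : List Int).map (fun t => if d > t then (1 : Int) else 0)).sum))

-- ===== PRECONDITION & SPEC =====
def Spec_calculate_risk_levels (discharge_data : List Int) (out : List Int) : Prop := out = calculate_risk_levels_alt discharge_data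
instance (discharge_data : List Int) (out : List Int) : Decidable (Spec_calculate_risk_levels discharge_data out) := by unfold Spec_calculate_risk_levels; infer_instance

-- ===== CLAIM (what is proved, stated in full; the proofs are below) =====
def Claim_equal_calculate_risk_levels : Prop := ∀ (discharge_data : List Int), Dom_calculate_risk_levels discharge_data → Spec_calculate_risk_levels discharge_data (calculate_risk_levels discharge_data)

-- ===== LEMMAS AND PROOFS =====

-- per-element agreement between A's cascade and B's count
theorem pv_elem_eq (d : Int) :
    (if d > 3000 then (if d > 5000 then (5 : Int) else 4)
     else if d > 2000 then 3
     else if d > 1500 then 2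
     else 1)
    = 1 + ((([1500, 2000, 3000, 5000] : List Int).map (fun t => if d > t then (1 : Int) else 0)).sum) := by
  simp only [List.map, List.sum_cons, List.sum_nil]
  split_ifs <;> omega

-- A's append-fold equals a map
theorem pv_foldl_map (f : Int → Int) (xs : List Int) (acc : List Int) :
    xs.foldl (fun rs d => rs ++ [f d]) acc = acc ++ xs.map f := by
  induction xs generalizing acc with
  | nil => simp
  | cons x xs ih => simp [List.foldl, ih]

-- ===== VERDICT (by name: the statement is the Claim_ definition above) =====
theorem calculate_risk_levels_spec : Claim_equal_calculate_risk_levels := by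
  intro xs _
  unfold Spec_calculate_risk_levels calculate_risk_levels calculate_risk_levels_alt
  rw [pv_foldl_map]
  simp only [List.nil_append]
  exact List.map_congr_left (fun d _ => pv_elem_eq d)
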